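-- pv_equiv track=rewrite | github.com/cutehammond772/problem-solving-archive | 백준/Gold/16437. 양 구출 작전/양 구출 작전.py | solve
-- ===== SOURCE A (Python) =====
-- def solve(G, A):
-- 	def traverse(prev, node):
-- 		for next in G[node]:
-- 			if prev == next:
-- 				continue
--
-- 			traverse(node, next)
-- 			A[node] += max(0, A[next])
--
-- 	traverse(0, 1)
-- 	return A[1]
-- ===== SOURCE B (Python) =====
-- def solve(G, A):
--     # Iterative post-order DFS with an explicit stack (mutates A in place, like the original).
--     stack = [(0, 1, False)]
--     while stack:
--         prev, node, done = stack.pop()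
--         if done:
--             A[prev] += max(0, A[node])
--         else:
--             for nxt in reversed(G[node]):
--                 if nxt != prev:
--                     stack.append((node, nxt, True))
--                     stack.append((node, nxt, False))
--     return A[1]
-- ===== Notes on version B (the rewrite author's own statement) =====
-- stated objective: alternative
-- what changed: A's recursive DFS (nested function traverse with in-place child aggregation) is replaced by an iterative post-order traversal over an explicit stack of (parent, node, done) frames, aggregating A[parent] += max(0, A[node]) when a node's done-marker pops.
-- outside the precondition, e.g. on solve({1: [2], 2: []}, [0, 1, 2]): A returns 3, B returns 3; on solve({1: [2], 2: [1], 3: [4]}, [0, 1, 2, 3]): A returns 3, B returns 3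
import Mathlib
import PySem

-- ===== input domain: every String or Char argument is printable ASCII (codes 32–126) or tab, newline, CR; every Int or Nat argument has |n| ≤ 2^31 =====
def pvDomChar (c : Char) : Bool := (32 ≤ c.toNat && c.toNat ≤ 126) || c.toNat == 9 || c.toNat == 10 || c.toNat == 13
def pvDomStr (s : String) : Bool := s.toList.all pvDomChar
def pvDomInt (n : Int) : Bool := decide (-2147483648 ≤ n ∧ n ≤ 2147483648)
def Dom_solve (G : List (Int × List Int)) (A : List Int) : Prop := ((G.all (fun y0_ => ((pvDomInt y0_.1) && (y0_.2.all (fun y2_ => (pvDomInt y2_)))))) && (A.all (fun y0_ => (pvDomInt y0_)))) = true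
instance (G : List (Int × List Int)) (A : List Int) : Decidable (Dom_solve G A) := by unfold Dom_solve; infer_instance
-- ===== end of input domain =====

-- B replaces A's recursive DFS by an iterative explicit-stack post-order traversal (alternative
-- decomposition, similar cost). Both Pythons mutate the list argument A in place identically; the
-- equivalence proved here is about the RETURN value.

-- ===== PORT A =====
-- shared Python primitives: G[node] (dict lookup), A[i] (read), A[i] += v (write)
def pvAdj (G : List (Int × List Int)) (n : Int) : List Int :=
  ((PySem.Dict.mk G).get? n).getD []       -- total form of G[node]; Pre_ guarantees the key exists
def pvGet (a : List Int) (i : Int) : Int :=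
  (PySem.List.pyGet? a i).getD 0           -- total form of A[i]; Pre_ guarantees the index is in range
def pvAddAt (a : List Int) (i v : Int) : List Int :=
  PySem.List.pySetD a i (pvGet a i + v)    -- A[i] += v

-- 'traverse(prev, node)' of A, fuel-guarded for totality only (Pre_ bounds the depth by G.length)
def solveGo (G : List (Int × List Int)) : Nat → Int → Int → List Int → List Int
  | 0, _, _, a => a
  | f + 1, prev, node, a =>
      (pvAdj G node).foldl
        (fun acc next =>
          if next = prev then acc
          else
            let a1 := solveGo G f node next acc
            pvAddAt a1 node (max 0 (pvGet a1 next))) a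

def solve (G : List (Int × List Int)) (A : List Int) : Int :=
  pvGet (solveGo G (G.length + 1) 0 1 A) 1

-- ===== PORT B =====
def pvMaxDeg (G : List (Int × List Int)) : Nat :=
  G.foldl (fun m p => max m p.2.length) 0

-- fuel bound for the stack loop, used only as a totality guard (Pre_ makes it sufficient)
def pvFuelB (G : List (Int × List Int)) : Nat := (pvMaxDeg G + 2) ^ (G.length + 2)

-- the 'while stack:' loop of Source B; the stack head is the top; fuel only guards totality
def runB (G : List (Int × List Int)) : Nat → List (Int × Int × Bool) → List Int → Option (List Int)
  | _, [], a => some a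
  | 0, _ :: _, _ => none
  | f + 1, (prev, node, done) :: s, a =>
      if done then
        runB G f s (pvAddAt a prev (max 0 (pvGet a node)))
      else
        runB G f
          ((pvAdj G node).reverse.foldl
            (fun st nxt => if nxt = prev then st else (node, nxt, false) :: (node, nxt, true) :: st) s) a

def solve_alt (G : List (Int × List Int)) (A : List Int) : Int :=
  match runB G (pvFuelB G) [(0, 1, false)] A with
  | some r => pvGet r 1
  | none => 0

-- ===== PRECONDITION & SPEC =====
def pvKeys (G : List (Int × List Int)) : List Int := G.map Prod.fst

-- the tree shape, in any key order: keys distinct, node 1 present, every key a valid index of A,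
-- neighbours are keys, no self-loops, edges symmetric, and the graph is acyclic (every nonempty
-- vertex subset has a vertex with at most one neighbour inside the subset)
def Pre_tree (G : List (Int × List Int)) (A : List Int) : Prop :=
  (pvKeys G).Nodup ∧ (1 : Int) ∈ pvKeys G ∧
  (∀ p ∈ G, 1 ≤ p.1 ∧ p.1 < (A.length : Int) ∧
    ∀ m ∈ p.2, m ∈ pvKeys G ∧ m ≠ p.1 ∧ p.1 ∈ pvAdj G m) ∧
  (∀ S ∈ (pvKeys G).sublists, S ≠ [] →
    ∃ v ∈ S, ((pvAdj G v).filter (fun x => decide (x ∈ S))).length ≤ 1)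

-- Pre_ admits (i) dicts encoding a simple symmetric acyclic graph containing key 1 — the
-- component of node 1 is then a tree, in ANY key/neighbour order — and (ii) the degenerate
-- adjacencies of node 1 holding only the sentinel 0 or only 1 itself. Outside Pre_, A raises
-- KeyError/IndexError or recurses forever on cyclic/asymmetric reachable parts; dicts whose part
-- UNREACHABLE from node 1 is asymmetric, cyclic or indexes outside A are also excluded (A never
-- visits them and still returns) because reachability is not a closed-form condition.
def Pre_solve (G : List (Int × List Int)) (A : List Int) : Prop :=
  Pre_tree G A ∨
    ((1 : Int) ∈ pvKeys G ∧ (1 : Int) < (A.length : Int) ∧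
      ((∀ m ∈ pvAdj G 1, m = 0) ∨ (∀ m ∈ pvAdj G 1, m = 1)))
instance (G : List (Int × List Int)) (A : List Int) : Decidable (Pre_solve G A) := by
  unfold Pre_solve Pre_tree; infer_instance

def pvWitness_solve : (List (Int × List Int)) × List Int :=
  ([(2, [1, 3]), (1, [2]), (3, [2])], [0, 1, 2, 3])

def Spec_solve (G : List (Int × List Int)) (A : List Int) (out : Int) : Prop := out = solve_alt G A
instance (G : List (Int × List Int)) (A : List Int) (out : Int) : Decidable (Spec_solve G A out) := by
  unfold Spec_solve; infer_instance

-- ===== CLAIM (what is proved, stated in full; the proofs are below) =====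
def Claim_equal_solve : Prop := ∀ (G : List (Int × List Int)) (A : List Int), Dom_solve G A → Pre_solve G A → Spec_solve G A (solve G A)

-- ===== LEMMAS AND PROOFS =====

theorem pvAdj_of_mem {G : List (Int × List Int)} {n : Int} {ns : List Int}
    (hnd : (pvKeys G).Nodup) (h : (n, ns) ∈ G) : pvAdj G n = ns := by
  have : (PySem.Dict.mk G).get? n = some ns :=
    PySem.Dict.get?_of_mem_items _ h (by simpa [PySem.Dict.keys, pvKeys] using hnd)
  simp [pvAdj, this]

theorem pvMem_keys {G : List (Int × List Int)} {n : Int} (h : n ∈ pvKeys G) :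
    ∃ ns, (n, ns) ∈ G := by
  rcases List.mem_map.mp h with ⟨p, hp, hpn⟩
  exact ⟨p.2, by simpa [← hpn] using hp⟩

theorem pvKeys_length (G : List (Int × List Int)) : (pvKeys G).length = G.length := by
  simp [pvKeys]

-- neighbours of a key are keys distinct from it, and the edge is symmetric
theorem pvAdjFacts {G : List (Int × List Int)} {A : List Int} (h : Pre_tree G A)
    {n m : Int} (hn : n ∈ pvKeys G) (hm : m ∈ pvAdj G n) :
    m ∈ pvKeys G ∧ m ≠ n ∧ n ∈ pvAdj G m := by
  obtain ⟨hnd, _, hall, _⟩ := h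
  obtain ⟨ns, hns⟩ := pvMem_keys hn
  have hadj : pvAdj G n = ns := pvAdj_of_mem hnd hns
  rw [hadj] at hm
  exact (hall (n, ns) hns).2.2 m hm

theorem pvTwo_le_filter {l : List Int} {q : Int → Bool} {a b : Int}
    (ha : a ∈ l.filter q) (hb : b ∈ l.filter q) (hne : a ≠ b) : 2 ≤ (l.filter q).length := by
  rcases hlf : l.filter q with _ | ⟨x, _ | ⟨y, t⟩⟩
  · simp [hlf] at ha
  · rw [hlf] at ha hb; simp at ha hb; exact absurd (ha.trans hb.symm) hne
  · simp

-- acyclicity: no chain of ≥ 3 distinct keys closes into a cycle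
theorem pvNoCycle {G : List (Int × List Int)} {A : List Int} (h : Pre_tree G A)
    {yc : List Int} (hlen : 3 ≤ yc.length) (hnd : yc.Nodup)
    (hkeys : ∀ x ∈ yc, x ∈ pvKeys G)
    (hchain : List.IsChain (fun a b => a ∈ pvAdj G b) yc)
    (hclose : yc.getD (yc.length - 1) 0 ∈ pvAdj G (yc.getD 0 0)) : False := by
  have hacyc := h.2.2.2
  have hget : ∀ (i : Nat) (hi : i < yc.length), yc.getD i 0 = yc[i]'hi := by
    intro i hi
    exact List.getD_eq_getElem yc 0 hi
  have hmemg : ∀ (i : Nat), i < yc.length → yc.getD i 0 ∈ yc := by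
    intro i hi
    rw [hget i hi]
    exact yc.getElem_mem hi
  have hinj : ∀ (i j : Nat), i < yc.length → j < yc.length → i ≠ j →
      yc.getD i 0 ≠ yc.getD j 0 := by
    intro i j hi hj hij he
    rw [hget i hi, hget j hj] at he
    exact hij (hnd.getElem_inj_iff.mp he)
  have hC : ∀ (i : Nat), i + 1 < yc.length → yc.getD i 0 ∈ pvAdj G (yc.getD (i + 1) 0) := by
    intro i hi
    rw [hget i (by omega), hget (i + 1) hi]
    exact (List.isChain_iff_getElem.mp hchain) i hi
  -- the vertex subset of the cycle, in key order
  set S := (pvKeys G).filter (fun x => decide (x ∈ yc)) with hS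
  have hmemS : ∀ x, x ∈ S ↔ x ∈ pvKeys G ∧ x ∈ yc := by
    intro x
    simp [hS, List.mem_filter]
  obtain ⟨v, hvS, hvdeg⟩ := hacyc S (List.mem_sublists.mpr (List.filter_sublist))
    (List.ne_nil_of_mem ((hmemS _).mpr ⟨hkeys _ (hmemg 0 (by omega)), hmemg 0 (by omega)⟩))
  obtain ⟨hvK, hvc⟩ := (hmemS v).mp hvS
  obtain ⟨i, hi, hvi⟩ := List.mem_iff_getElem.mp hvc
  have hvi' : yc.getD i 0 = v := by rw [hget i hi]; exact hvi
  -- sym: b ∈ adj a → a ∈ adj b for chain/closing members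
  have hsym : ∀ {a b : Int}, b ∈ pvKeys G → a ∈ pvAdj G b → b ∈ pvAdj G a := by
    intro a b hbK hab
    exact (pvAdjFacts h hbK hab).2.2
  -- produce two distinct neighbours of v inside yc
  have hnb : ∃ (j k : Nat), j < yc.length ∧ k < yc.length ∧ j ≠ k ∧
      yc.getD j 0 ∈ pvAdj G v ∧ yc.getD k 0 ∈ pvAdj G v := by
    rw [← hvi']
    by_cases hi0 : i = 0
    · subst hi0
      refine ⟨1, yc.length - 1, by omega, by omega, by omega, ?_, hclose⟩
      exact hsym (hkeys _ (hmemg 1 (by omega))) (hC 0 (by omega))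
    · by_cases hiL : i = yc.length - 1
      · subst hiL
        refine ⟨yc.length - 2, 0, by omega, by omega, by omega, ?_, ?_⟩
        · have := hC (yc.length - 2) (by omega)
          have he : yc.length - 2 + 1 = yc.length - 1 := by omega
          rw [he] at this
          exact this
        · exact hsym (hkeys _ (hmemg _ (by omega))) hclose
      · refine ⟨i - 1, i + 1, by omega, by omega, by omega, ?_, ?_⟩
        · have := hC (i - 1) (by omega)
          have he : i - 1 + 1 = i := by omega
          rw [he] at this
          exact this
        · exact hsym (hkeys _ (hmemg (i + 1) (by omega))) (hC i (by omega))
  obtain ⟨j, k, hj, hk, hjk, hjadj, hkadj⟩ := hnb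
  have hne : yc.getD j 0 ≠ yc.getD k 0 := hinj j k hj hk hjk
  have hmf : ∀ (t : Nat), t < yc.length → yc.getD t 0 ∈ pvAdj G v →
      yc.getD t 0 ∈ (pvAdj G v).filter (fun x => decide (x ∈ S)) := by
    intro t ht hadj
    refine List.mem_filter.mpr ⟨hadj, ?_⟩
    have hKt : yc.getD t 0 ∈ pvKeys G := hkeys _ (hmemg t ht)
    have hin : yc.getD t 0 ∈ S := (hmemS _).mpr ⟨hKt, hmemg t ht⟩
    simpa using hin
  have := pvTwo_le_filter (hmf j hj hjadj) (hmf k hk hkadj) hne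
  omega

-- the DFS state: rest is the (reversed) path of ancestors below the current node n;
-- n :: rest is a simple chain of keys ending at the root 1, and p is n's predecessor
def pvInvP (G : List (Int × List Int)) (rest : List Int) (p n : Int) : Prop :=
  (n :: rest).Nodup ∧ (∀ x ∈ n :: rest, x ∈ pvKeys G) ∧
  List.IsChain (fun a b => a ∈ pvAdj G b) (n :: rest) ∧
  (n :: rest).getLast? = some 1 ∧
  (rest.head? = some p ∨ (rest = [] ∧ p = 0))

theorem pvInvLen {G : List (Int × List Int)} {rest : List Int} {p n : Int}
    (hInv : pvInvP G rest p n) : rest.length + 1 ≤ G.length := by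
  have := (List.subperm_of_subset hInv.1 (fun x hx => hInv.2.1 x hx)).length_le
  have hk := pvKeys_length G
  simpa [hk] using this

-- the one graph fact the whole proof rests on: a traversal step reaches a NEW node
theorem pvStepP {G : List (Int × List Int)} {A : List Int} {rest : List Int} {p n m : Int}
    (h : Pre_tree G A) (hInv : pvInvP G rest p n) (hm : m ∈ pvAdj G n) (hne : m ≠ p) :
    pvInvP G (n :: rest) n m := by
  obtain ⟨hnd, hkeys, hchain, hlast, hhead⟩ := hInv
  have hnK : n ∈ pvKeys G := hkeys n List.mem_cons_self
  obtain ⟨hmK, hmn, hback⟩ := pvAdjFacts h hnK hm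
  -- m is not on the current path: otherwise the path segment from m plus the edge n—m is a cycle
  have hnotin : m ∉ n :: rest := by
    intro hmem
    have hmrest : m ∈ rest := by
      rcases List.mem_cons.mp hmem with he | hr
      · exact absurd he hmn
      · exact hr
    obtain ⟨q, rest₂, rfl⟩ : ∃ q rest₂, rest = q :: rest₂ := by
      cases rest with
      | nil => simp at hmrest
      | cons q t => exact ⟨q, t, rfl⟩
    have hq : q = p := by
      rcases hhead with hh | ⟨hh, _⟩
      · simpa using hh
      · simp at hh
    have hm2 : m ∈ rest₂ := by
      rcases List.mem_cons.mp hmrest with he | hr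
      · exact absurd (hq ▸ he) hne
      · exact hr
    -- the cycle: the path prefix down to m
    set path := n :: q :: rest₂ with hpath
    have hmpath : m ∈ path := by simp [hpath, hm2]
    set idx := path.idxOf m with hidx
    have hidxlt : idx < path.length := List.idxOf_lt_length_of_mem hmpath
    have hpidx : path.getD idx 0 = m := by
      rw [List.getD_eq_getElem path 0 hidxlt]
      exact List.getElem_idxOf _
    have hidx0 : idx ≠ 0 := by
      intro he
      apply hmn
      rw [← hpidx, he]
      rfl
    have hidx1 : idx ≠ 1 := by
      intro he
      apply hne
      rw [← hpidx, he, ← hq]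
      rfl
    set cyc := path.take (idx + 1) with hcyc
    have hclen : cyc.length = idx + 1 := by
      simp [hcyc]
      omega
    have hgetc : ∀ (i : Nat), i < cyc.length → cyc.getD i 0 = path.getD i 0 := by
      intro i hi
      rw [List.getD_eq_getElem cyc 0 hi,
        List.getD_eq_getElem path 0 (by simp [hclen] at hi; omega)]
      exact List.getElem_take
    refine pvNoCycle h (yc := cyc) (by omega) hnd.take ?_ (hchain.take _) ?_
    · intro x hx
      exact hkeys x (List.mem_of_mem_take hx)
    · rw [hgetc (cyc.length - 1) (by omega), hgetc 0 (by omega)]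
      have h1 : cyc.length - 1 = idx := by omega
      rw [h1, hpidx]
      simpa [hpath] using hm
  refine ⟨List.nodup_cons.mpr ⟨hnotin, hnd⟩, ?_, ?_, ?_, Or.inl rfl⟩
  · intro x hx
    rcases List.mem_cons.mp hx with he | hr
    · subst he; exact hmK
    · exact hkeys x hr
  · exact List.isChain_cons_cons.mpr ⟨hm, hchain⟩
  · rw [List.getLast?_cons_cons]
    exact hlast


-- fuel-insensitivity of A's traversal above the measure G.length - rest.length
theorem solveGo_stable {G : List (Int × List Int)} {A : List Int} (h : Pre_tree G A) :
    ∀ k : Nat, ∀ rest : List Int, ∀ p n : Int, ∀ a f f', pvInvP G rest p n →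
      G.length - rest.length ≤ k → k ≤ f → k ≤ f' →
      solveGo G f p n a = solveGo G f' p n a := by
  intro k
  induction k with
  | zero =>
    intro rest p n a f f' hInv hms _ _
    have := pvInvLen hInv
    omega
  | succ k ih =>
    intro rest p n a f f' hInv hms hf hf'
    obtain ⟨f1, rfl⟩ : ∃ f1, f = f1 + 1 := ⟨f - 1, by omega⟩
    obtain ⟨f2, rfl⟩ : ∃ f2, f' = f2 + 1 := ⟨f' - 1, by omega⟩
    simp only [solveGo]
    refine PySem.List.foldl_congr_mem _ _ _ _ ?_
    intro acc x hx
    by_cases hxp : x = p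
    · simp [hxp]
    · have hinv' : pvInvP G (n :: rest) n x := pvStepP h hInv hx hxp
      have hlen := pvInvLen hinv'
      have heq : solveGo G f1 n x acc = solveGo G f2 n x acc := by
        have h1 := ih (n :: rest) n x acc f1 k hinv' (by simp; omega) (by omega) (by omega)
        have h2 := ih (n :: rest) n x acc f2 k hinv' (by simp; omega) (by omega) (by omega)
        exact h1.trans h2.symm
      simp [hxp, heq]

theorem runB_mono {G : List (Int × List Int)} :
    ∀ f (s : List (Int × Int × Bool)) a r, runB G f s a = some r → runB G (f + 1) s a = some r := by
  intro f
  induction f with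
  | zero =>
    intro s a r h
    cases s with
    | nil => simpa [runB] using h
    | cons x t => simp [runB] at h
  | succ f ih =>
    intro s a r h
    cases s with
    | nil => simpa [runB] using h
    | cons x t =>
      obtain ⟨p, n, d⟩ := x
      by_cases hd : d <;> simp [runB, hd] at h ⊢ <;> exact ih _ _ _ h

theorem runB_le {G : List (Int × List Int)} {f f' : Nat} {s a r}
    (hle : f ≤ f') (h : runB G f s a = some r) : runB G f' s a = some r := by
  induction f', hle using Nat.le_induction with
  | base => exact h
  | succ _ _ ih => exact runB_mono _ _ _ _ ih

-- the reversed push loop of Source B builds exactly the frames of the kept children, in order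
theorem pvPush_eq (p n : Int) : ∀ (l : List Int) (s : List (Int × Int × Bool)),
    l.reverse.foldl
      (fun st x => if x = p then st else (n, x, false) :: (n, x, true) :: st) s
    = (l.filter (fun x => x != p)).flatMap (fun x => [(n, x, false), (n, x, true)]) ++ s := by
  intro l
  induction l with
  | nil => intro s; simp
  | cons x t ih =>
    intro s
    rw [List.reverse_cons, List.foldl_append, ih]
    by_cases hx : x = p <;> simp [hx]

-- A's loop with its 'continue' = the same loop over the kept children
theorem pvFoldl_skip (p : Int) (h : List Int → Int → List Int) :
    ∀ (l : List Int) (a : List Int),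
      l.foldl (fun acc x => if x = p then acc else h acc x) a
      = (l.filter (fun x => x != p)).foldl h a := by
  intro l
  induction l with
  | nil => intro a; simp
  | cons x t ih => intro a; by_cases hx : x = p <;> simp [hx, ih]

theorem pvFoldl_max_ge (l : List (Int × List Int)) (m0 : Nat) :
    m0 ≤ l.foldl (fun m p => max m p.2.length) m0 ∧
    ∀ p ∈ l, p.2.length ≤ l.foldl (fun m p => max m p.2.length) m0 := by
  induction l generalizing m0 with
  | nil => simp
  | cons q t ih =>
    obtain ⟨h1, h2⟩ := ih (max m0 q.2.length)
    refine ⟨le_trans (le_max_left _ _) h1, ?_⟩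
    intro p hp
    rcases List.mem_cons.mp hp with rfl | hp
    · exact le_trans (le_max_right _ _) h1
    · exact h2 p hp

theorem pvDeg_le {G : List (Int × List Int)} {n : Int} {ns : List Int}
    (h : (n, ns) ∈ G) : ns.length ≤ pvMaxDeg G :=
  (pvFoldl_max_ge G 0).2 (n, ns) h

-- the body of A's loop once the 'continue' is filtered out, at full fuel
def pvBody (G : List (Int × List Int)) (n : Int) (acc : List Int) (c : Int) : List Int :=
  pvAddAt (solveGo G (G.length + 1) n c acc) n (max 0 (pvGet (solveGo G (G.length + 1) n c acc) c))

-- processing the pushed frames of a list of children = folding A's loop body over them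
theorem pvChain {G : List (Int × List Int)} {k : Nat} {rest' : List Int}
    (IH : ∀ (rest : List Int) (p n : Int), pvInvP G rest p n → G.length - rest.length ≤ k →
      ∀ (a : List Int) (s : List (Int × Int × Bool)) f r,
        runB G f s (solveGo G (G.length + 1) p n a) = some r →
        runB G (f + (pvMaxDeg G + 2) ^ (k + 1)) ((p, n, false) :: s) a = some r)
    (n : Int) :
    ∀ cs : List Int, (∀ c ∈ cs, pvInvP G rest' n c ∧ G.length - rest'.length ≤ k) →
      ∀ (a : List Int) (s : List (Int × Int × Bool)) f r,
        runB G f s (cs.foldl (pvBody G n) a) = some r →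
        runB G (f + cs.length * ((pvMaxDeg G + 2) ^ (k + 1) + 1))
          (cs.flatMap (fun c => [(n, c, false), (n, c, true)]) ++ s) a = some r := by
  intro cs
  induction cs with
  | nil => intro _ a s f r h0; simpa using h0
  | cons c cs ih =>
    intro hprops a s f r hrun
    obtain ⟨hcInv, hcms⟩ := hprops c (List.mem_cons_self)
    have h1 := ih (fun c' hc' => hprops c' (List.mem_cons_of_mem _ hc'))
      (pvBody G n a c) s f r (by simpa [List.foldl_cons] using hrun)
    have h2 : runB G (f + cs.length * ((pvMaxDeg G + 2) ^ (k + 1) + 1) + 1)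
        ((n, c, true) :: (cs.flatMap (fun c => [(n, c, false), (n, c, true)]) ++ s))
        (solveGo G (G.length + 1) n c a) = some r := by
      simpa [runB, pvBody] using h1
    have h3 := IH rest' n c hcInv hcms a _ _ r h2
    have harith : f + (cs.length + 1) * ((pvMaxDeg G + 2) ^ (k + 1) + 1)
        = f + cs.length * ((pvMaxDeg G + 2) ^ (k + 1) + 1) + 1 + (pvMaxDeg G + 2) ^ (k + 1) := by
      rw [Nat.succ_mul]; omega
    simpa [harith] using h3

-- core simulation: one pending frame (p, n, false) behaves like A's traverse(p, n)
theorem pvSim {G : List (Int × List Int)} {A : List Int} (h : Pre_tree G A) :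
    ∀ k : Nat, ∀ (rest : List Int) (p n : Int), pvInvP G rest p n → G.length - rest.length ≤ k →
      ∀ (a : List Int) (s : List (Int × Int × Bool)) f r,
        runB G f s (solveGo G (G.length + 1) p n a) = some r →
        runB G (f + (pvMaxDeg G + 2) ^ (k + 1)) ((p, n, false) :: s) a = some r := by
  intro k
  induction k with
  | zero =>
    intro rest p n hInv hms
    have := pvInvLen hInv
    omega
  | succ k IH =>
    intro rest p n hInv hms a s f r hrun
    -- the kept children
    set cs : List Int := (pvAdj G n).filter (fun x => x != p) with hcs
    have hcsmem : ∀ c ∈ cs, c ∈ pvAdj G n ∧ c ≠ p := by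
      intro c hc
      have := List.mem_filter.mp hc
      exact ⟨this.1, by simpa using this.2⟩
    have hlenP := pvInvLen hInv
    have hprops : ∀ c ∈ cs, pvInvP G (n :: rest) n c ∧ G.length - (n :: rest).length ≤ k := by
      intro c hc
      obtain ⟨hc1, hc2⟩ := hcsmem c hc
      exact ⟨pvStepP h hInv hc1 hc2, by simp; omega⟩
    -- rewrite A's traversal as a fold of pvBody over cs
    have hsolve : solveGo G (G.length + 1) p n a = cs.foldl (pvBody G n) a := by
      show solveGo G (G.length + 1) p n a = _
      simp only [solveGo]
      rw [pvFoldl_skip]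
      refine PySem.List.foldl_congr_mem _ _ _ _ ?_
      intro acc c hc
      obtain ⟨hcInv, hcms⟩ := hprops c hc
      have hcl := pvInvLen hcInv
      have hstab : solveGo G G.length n c acc = solveGo G (G.length + 1) n c acc :=
        solveGo_stable h (G.length - (n :: rest).length) (n :: rest) n c acc G.length
          (G.length + 1) hcInv (le_refl _) (by omega) (by omega)
      simp only [pvBody, hstab]
    -- degree bound on the number of kept children
    have hnK : n ∈ pvKeys G := hInv.2.1 n List.mem_cons_self
    obtain ⟨ns, hnsG⟩ := pvMem_keys hnK
    have hadj : pvAdj G n = ns := pvAdj_of_mem h.1 hnsG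
    have hdeg : cs.length ≤ pvMaxDeg G := by
      have h1 : cs.length ≤ (pvAdj G n).length := by
        rw [hcs]; exact List.length_filter_le _ _
      have h2 := pvDeg_le hnsG
      rw [hadj] at h1
      omega
    -- fuel arithmetic
    have hX : pvMaxDeg G + 2 ≤ (pvMaxDeg G + 2) ^ (k + 1) :=
      Nat.le_self_pow (by omega) _
    have hfuel : cs.length * ((pvMaxDeg G + 2) ^ (k + 1) + 1) + 1
        ≤ (pvMaxDeg G + 2) ^ (k + 1 + 1) := by
      have h1 : cs.length * ((pvMaxDeg G + 2) ^ (k + 1) + 1)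
          ≤ pvMaxDeg G * ((pvMaxDeg G + 2) ^ (k + 1) + 1) :=
        Nat.mul_le_mul_right _ hdeg
      have h2 : pvMaxDeg G * ((pvMaxDeg G + 2) ^ (k + 1) + 1) + 1
          ≤ (pvMaxDeg G + 2) ^ (k + 1) * (pvMaxDeg G + 2) := by
        have e1 : pvMaxDeg G * ((pvMaxDeg G + 2) ^ (k + 1) + 1) + 1
            = pvMaxDeg G * (pvMaxDeg G + 2) ^ (k + 1) + (pvMaxDeg G + 1) := by ring
        have e2 : (pvMaxDeg G + 2) ^ (k + 1) * (pvMaxDeg G + 2)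
            = pvMaxDeg G * (pvMaxDeg G + 2) ^ (k + 1) + 2 * (pvMaxDeg G + 2) ^ (k + 1) := by ring
        rw [e1, e2]
        have : pvMaxDeg G + 1 ≤ 2 * (pvMaxDeg G + 2) ^ (k + 1) := by omega
        omega
      calc cs.length * ((pvMaxDeg G + 2) ^ (k + 1) + 1) + 1
          ≤ pvMaxDeg G * ((pvMaxDeg G + 2) ^ (k + 1) + 1) + 1 := by omega
        _ ≤ (pvMaxDeg G + 2) ^ (k + 1) * (pvMaxDeg G + 2) := h2
        _ = (pvMaxDeg G + 2) ^ (k + 1 + 1) := (pow_succ _ _).symm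
    -- run the chain, then lift the fuel
    rw [hsolve] at hrun
    have hchain := pvChain IH n cs hprops a s f r hrun
    obtain ⟨F, hF⟩ : ∃ F, f + (pvMaxDeg G + 2) ^ (k + 1 + 1) = F + 1 :=
      ⟨f + (pvMaxDeg G + 2) ^ (k + 1 + 1) - 1, by
        have := Nat.one_le_pow (k + 1 + 1) (pvMaxDeg G + 2) (by omega); omega⟩
    rw [hF]
    show runB G F ((pvAdj G n).reverse.foldl
      (fun st nxt => if nxt = p then st else (n, nxt, false) :: (n, nxt, true) :: st) s) a = some r
    rw [pvPush_eq]
    exact runB_le (by omega) hchain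

-- a loop whose every element is the skipped one does nothing
theorem pvFoldl_skip_all {p : Int} (f0 : List Int → Int → List Int) :
    ∀ {l : List Int}, (∀ m ∈ l, m = p) → ∀ a : List Int,
      l.foldl (fun acc next => if next = p then acc else f0 acc next) a = a := by
  intro l
  induction l with
  | nil => intro _ a; rfl
  | cons x t ih =>
    intro hl a
    have hx : x = p := hl x (List.mem_cons_self)
    simpa [hx] using ih (fun m hm => hl m (List.mem_cons_of_mem _ hm)) a

theorem pvFilter_all_eq {p : Int} {l : List Int} (hl : ∀ m ∈ l, m = p) :
    l.filter (fun x => x != p) = [] := by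
  refine List.filter_eq_nil_iff.mpr ?_
  intro x hx
  simp [hl x hx]

-- when node 1's adjacency is all 1s, A's traversal just repeats A[1] += max(0, A[1])
theorem pvSolveGo_ones {G : List (Int × List Int)} (h1 : ∀ m ∈ pvAdj G 1, m = 1) (f : Nat) (a : List Int) :
    solveGo G (f + 1) 0 1 a
      = (pvAdj G 1).foldl (fun acc _ => pvAddAt acc 1 (max 0 (pvGet acc 1))) a := by
  simp only [solveGo]
  refine PySem.List.foldl_congr_mem _ _ _ _ ?_
  intro acc x hx
  have hx1 : x = 1 := h1 x hx
  have hstop : solveGo G f 1 1 acc = acc := by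
    cases f with
    | zero => rfl
    | succ f' => simp only [solveGo]; exact pvFoldl_skip_all _ h1 acc
  simp [hx1, hstop]

-- and B's machine pops the corresponding frame pairs one by one
theorem pvRunB_ones {G : List (Int × List Int)} (h1 : ∀ m ∈ pvAdj G 1, m = 1) :
    ∀ (l : List Int), (∀ m ∈ l, m = 1) → ∀ (a : List Int) (f : Nat), 2 * l.length ≤ f →
      runB G f (l.flatMap (fun c => [((1 : Int), c, false), ((1 : Int), c, true)])) a
        = some (l.foldl (fun acc _ => pvAddAt acc 1 (max 0 (pvGet acc 1))) a) := by
  intro l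
  induction l with
  | nil => intro _ a f _; cases f <;> rfl
  | cons c t ih =>
    intro hl a f hf
    have hc : c = 1 := hl c (List.mem_cons_self)
    subst hc
    obtain ⟨f2, rfl⟩ : ∃ f2, f = f2 + 1 + 1 := ⟨f - 2, by simp at hf; omega⟩
    simp only [List.flatMap_cons, List.cons_append, List.nil_append, runB, if_neg, Bool.false_eq_true,
      not_false_eq_true, if_true]
    rw [pvPush_eq, pvFilter_all_eq h1]
    simp only [List.flatMap_nil, List.nil_append, runB]
    have := ih (fun m hm => hl m (List.mem_cons_of_mem _ hm))
      (pvAddAt a 1 (max 0 (pvGet a 1))) f2 (by simp at hf ⊢; omega)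
    simpa using this

theorem pvOne_le_fuelB (G : List (Int × List Int)) : 1 ≤ pvFuelB G :=
  Nat.one_le_pow _ _ (by omega)

-- the adjacency of a present key is an entry of G
theorem pvAdj_mem_of_key {G : List (Int × List Int)} (hk : (1 : Int) ∈ pvKeys G) :
    (1, pvAdj G 1) ∈ G := by
  cases hv : (PySem.Dict.mk G).get? 1 with
  | none =>
    exfalso
    have := (PySem.Dict.get?_eq_none_iff_not_mem_keys (d := PySem.Dict.mk G) (k := (1 : Int))).mp hv
    exact this (by simpa [PySem.Dict.keys, pvKeys] using hk)
  | some ns =>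
    have hmem := PySem.Dict.mem_items_of_get?_eq_some _ hv
    simpa [pvAdj, hv] using hmem

-- ===== VERDICT (by name: the statement is the Claim_ definition above) =====
theorem solve_spec : Claim_equal_solve := by
  intro G A _ hPre
  unfold Spec_solve
  rcases hPre with htree | ⟨hk, _, hdeg⟩
  · -- tree case: the stack machine simulates the recursive traversal
    have hInv : pvInvP G [] 0 1 := by
      refine ⟨by simp, ?_, by simp, by simp, Or.inr ⟨rfl, rfl⟩⟩
      intro x hx
      have hx1 : x = 1 := by simpa using hx
      subst hx1
      exact htree.2.1
    have hsim := pvSim htree G.length [] 0 1 hInv (by omega) A [] 0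
      (solveGo G (G.length + 1) 0 1 A) (by simp [runB])
    have hfin : runB G (pvFuelB G) [(0, 1, false)] A = some (solveGo G (G.length + 1) 0 1 A) := by
      refine runB_le ?_ hsim
      have := Nat.pow_le_pow_right (n := pvMaxDeg G + 2) (by omega)
        (show G.length + 1 ≤ G.length + 2 by omega)
      simpa [pvFuelB] using this
    simp [solve, solve_alt, hfin]
  · -- degenerate case: the traversal never leaves node 1
    have hD := pvDeg_le (pvAdj_mem_of_key hk)
    obtain ⟨F, hF⟩ : ∃ F, pvFuelB G = F + 1 :=
      ⟨pvFuelB G - 1, by have := pvOne_le_fuelB G; omega⟩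
    have hFbig : 2 * (pvAdj G 1).length ≤ F := by
      have h2 : 2 * pvMaxDeg G + 1 ≤ (pvMaxDeg G + 2) ^ 2 := by nlinarith [sq_nonneg (pvMaxDeg G)]
      have h3 : (pvMaxDeg G + 2) ^ 2 ≤ (pvMaxDeg G + 2) ^ (G.length + 2) :=
        Nat.pow_le_pow_right (by omega) (by omega)
      have : (pvMaxDeg G + 2) ^ (G.length + 2) = pvFuelB G := rfl
      omega
    rcases hdeg with h0 | h1
    · -- G[1] holds only the sentinel 0: both sides leave A unchanged
      have hsolve : solveGo G (G.length + 1) 0 1 A = A := by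
        simp only [solveGo]; exact pvFoldl_skip_all _ h0 A
      have halt : runB G (pvFuelB G) [(0, 1, false)] A = some A := by
        rw [hF]
        simp only [runB, Bool.false_eq_true, if_false]
        rw [pvPush_eq, pvFilter_all_eq h0]
        simp only [List.flatMap_nil, List.nil_append]
        cases F <;> rfl
      simp [solve, solve_alt, hsolve, halt]
    · -- G[1] holds only 1 itself: both sides repeat A[1] += max(0, A[1])
      have hkeep : (pvAdj G 1).filter (fun x => x != (0 : Int)) = pvAdj G 1 :=
        List.filter_eq_self.mpr (fun x hx => by simp [h1 x hx])
      have hsolve := pvSolveGo_ones h1 G.length A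
      have halt : runB G (pvFuelB G) [(0, 1, false)] A
          = some ((pvAdj G 1).foldl (fun acc _ => pvAddAt acc 1 (max 0 (pvGet acc 1))) A) := by
        rw [hF]
        simp only [runB, Bool.false_eq_true, if_false]
        rw [pvPush_eq, hkeep]
        have hrun := pvRunB_ones h1 (pvAdj G 1) h1 A F hFbig
        simpa using hrun
      simp [solve, solve_alt, hsolve, halt]
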